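-- pv_equiv track=rewrite | github.com/hfzizz/PDFtoWord | extractors/table_extractor.py | _collapse_empty_columns
-- ===== SOURCE A (Python) =====
-- def _collapse_empty_columns(
--     rows: list[list[str]],
-- ) -> list[list[str]]:
--     """Remove columns where all cells are empty.
--
--     PyMuPDF's ``find_tables()`` creates a fine-grained grid that
--     splits merged cells into many sub-columns.  Most of those
--     sub-columns are entirely empty (or contain ``None`` which was
--     already mapped to ``""``).  Removing them yields the logical
--     column structure the user expects.
--
--     Additionally, when two adjacent columns are "complementary"
--     (one has mostly headers, the other has mostly data values,
--     and they never overlap in the same row), they are merged.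
--     """
--     if not rows:
--         return rows
--
--     num_cols = max(len(r) for r in rows)
--     if num_cols <= 1:
--         return rows
--
--     # 1. Identify columns that are entirely empty.
--     keep: list[bool] = []
--     for col_idx in range(num_cols):
--         has_content = False
--         for row in rows:
--             if col_idx < len(row) and row[col_idx].strip():
--                 has_content = True
--                 break
--         keep.append(has_content)
--
--     # 2. Build filtered rows retaining only non-empty columns.
--     kept_indices = [i for i, k in enumerate(keep) if k]
--     if not kept_indices:
--         return rows  # All empty — return as-is.
--
--     filtered_rows: list[list[str]] = []
--     for row in rows:
--         filtered_rows.append([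
--             row[i] if i < len(row) else "" for i in kept_indices
--         ])
--
--     # 3. Merge adjacent complementary columns: two columns where
--     #    the cells are never both non-empty in the same row.
--     merged = True
--     while merged:
--         merged = False
--         new_cols = len(filtered_rows[0]) if filtered_rows else 0
--         if new_cols <= 1:
--             break
--         for ci in range(new_cols - 1):
--             # Check if columns ci and ci+1 are complementary.
--             overlap = False
--             for row in filtered_rows:
--                 a = row[ci].strip() if ci < len(row) else ""
--                 b = row[ci + 1].strip() if ci + 1 < len(row) else ""
--                 if a and b:
--                     overlap = True
--                     break
--             if not overlap:
--                 # Merge ci+1 into ci.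
--                 for row in filtered_rows:
--                     a = row[ci].strip() if ci < len(row) else ""
--                     b = row[ci + 1].strip() if ci + 1 < len(row) else ""
--                     row[ci] = (a + " " + b).strip()
--                 # Remove column ci+1.
--                 for row in filtered_rows:
--                     if ci + 1 < len(row):
--                         del row[ci + 1]
--                 merged = True
--                 break  # Restart scan after structural change.
--
--     return filtered_rows
-- ===== SOURCE B (Python) =====
-- def _collapse_empty_columns(
--     rows: list[list[str]],
-- ) -> list[list[str]]:
--     """Column-major single pass: transpose to columns, drop empty columns,
--     merge complementary neighbours with one accumulator sweep (merging only
--     grows a column's content, so the leftmost complementary pair only moves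
--     rightward and one pass suffices), transpose back."""
--     if not rows:
--         return rows
--     num_cols = max(len(r) for r in rows)
--     if num_cols <= 1:
--         return rows
--     kept = [i for i in range(num_cols)
--             if any(i < len(r) and r[i].strip() for r in rows)]
--     if not kept:
--         return rows
--     cols = [[r[i] if i < len(r) else "" for r in rows] for i in kept]
--     out_cols = []
--     acc = cols[0]
--     for col in cols[1:]:
--         if all(not (a.strip() and b.strip()) for a, b in zip(acc, col)):
--             acc = [(a.strip() + " " + b.strip()).strip()
--                    for a, b in zip(acc, col)]
--         else:
--             out_cols.append(acc)
--             acc = col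
--     out_cols.append(acc)
--     return [[c[j] for c in out_cols] for j in range(len(rows))]
-- ===== Notes on version B (the rewrite author's own statement) =====
-- stated objective: alternative
-- what changed: Replaces A's restart-from-zero while-loop over row-major data (rescanning column pairs after every merge) with a column-major transpose and one left-to-right accumulator sweep; merging only grows a column's content, so the leftmost complementary pair moves rightward and a single pass suffices.
import Mathlib
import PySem

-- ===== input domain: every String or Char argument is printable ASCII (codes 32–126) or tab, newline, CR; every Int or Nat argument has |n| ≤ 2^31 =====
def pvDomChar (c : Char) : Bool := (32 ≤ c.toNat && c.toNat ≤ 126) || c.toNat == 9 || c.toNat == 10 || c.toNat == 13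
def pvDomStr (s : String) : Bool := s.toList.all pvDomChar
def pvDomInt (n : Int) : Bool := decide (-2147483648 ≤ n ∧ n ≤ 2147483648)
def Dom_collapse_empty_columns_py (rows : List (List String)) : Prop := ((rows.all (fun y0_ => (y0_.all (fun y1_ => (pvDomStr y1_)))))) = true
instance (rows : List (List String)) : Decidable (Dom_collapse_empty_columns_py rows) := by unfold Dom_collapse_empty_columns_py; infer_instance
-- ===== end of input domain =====

-- B replaces A's restart-from-zero rescans with a column-major single
-- accumulator sweep (merging only grows a column, so the leftmost
-- complementary pair moves rightward); equivalence of return values is proved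
-- (A mutates its local filtered copies only, never the caller's argument).

-- ===== PORT A =====
-- row[j].strip() guarded by j < len(row), as A writes it
def aCell (row : List String) (j : Nat) : String :=
  if j < row.length then PySem.Str.strip (row.getD j "") else ""

-- the inner any-with-break loop checking whether columns ci, ci+1 overlap
def aOverlap (fr : List (List String)) (ci : Nat) : Bool :=
  fr.any (fun row => !(aCell row ci == "") && !(aCell row (ci + 1) == ""))

-- Python's `for ci in range(new_cols-1): … break`: first ci with no overlap
def aFirst (fr : List (List String)) (n : Nat) : Option Nat :=
  (List.range (n - 1)).find? (fun ci => !aOverlap fr ci)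

-- Python's merge: one pass assigning row[ci] := (a + " " + b).strip(), then a
-- second pass deleting row[ci+1] (row[ci] is in range whenever this runs, so
-- List.set is exact)
def aMerge (fr : List (List String)) (ci : Nat) : List (List String) :=
  (fr.map (fun row =>
      row.set ci (PySem.Str.strip (aCell row ci ++ " " ++ aCell row (ci + 1))))).map
    (fun row => if ci + 1 < row.length then row.eraseIdx (ci + 1) else row)

-- Python's `while merged:` loop; new_cols = len(filtered_rows[0]) if filtered_rows else 0.
-- The fuel only bounds the iteration count and never cuts the loop short: every
-- merge deletes one entry of the first row, so (first-row length) iterations suffice.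
def aLoopN : Nat → List (List String) → List (List String)
  | 0, fr => fr
  | fuel + 1, fr =>
      if (fr.headD []).length ≤ 1 then fr
      else
        match aFirst fr (fr.headD []).length with
        | none => fr
        | some ci => aLoopN fuel (aMerge fr ci)

def aLoop (fr : List (List String)) : List (List String) :=
  aLoopN (fr.headD []).length fr

def collapse_empty_columns_py (rows : List (List String)) : List (List String) :=
  if rows = [] then rows
  else
    let num_cols := (PySem.List.max? (rows.map (fun r => r.length)) id).getD 0
    if num_cols ≤ 1 then rows
    else
      let keep : List Bool := (List.range num_cols).map (fun ci =>
        rows.any (fun row => decide (ci < row.length) && !(PySem.Str.strip (row.getD ci "") == "")))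
      let kept : List Nat := (keep.zipIdx.filter (fun p => p.1)).map (fun p => p.2)
      if kept = [] then rows
      else
        let filtered := rows.map (fun row =>
          kept.map (fun i => if i < row.length then row.getD i "" else ""))
        aLoop filtered

-- ===== PORT B =====
-- all(not (a.strip() and b.strip()) for a, b in zip(acc, col))
def bCompl (x y : List String) : Bool :=
  (x.zip y).all (fun p => !(!(PySem.Str.strip p.1 == "") && !(PySem.Str.strip p.2 == "")))

-- [(a.strip() + " " + b.strip()).strip() for a, b in zip(acc, col)]
def bMerge (x y : List String) : List String :=
  (x.zip y).map (fun p => PySem.Str.strip (PySem.Str.strip p.1 ++ " " ++ PySem.Str.strip p.2))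

-- the accumulator sweep (Source B's for-loop over cols[1:], final append of acc)
def bGo (acc : List String) : List (List String) → List (List String)
  | [] => [acc]
  | c :: cs => if bCompl acc c then bGo (bMerge acc c) cs else acc :: bGo c cs

def collapse_empty_columns_py_alt (rows : List (List String)) : List (List String) :=
  if rows = [] then rows
  else
    let num_cols := (PySem.List.max? (rows.map (fun r => r.length)) id).getD 0
    if num_cols ≤ 1 then rows
    else
      let kept : List Nat := (List.range num_cols).filter (fun i =>
        rows.any (fun r => decide (i < r.length) && !(PySem.Str.strip (r.getD i "") == "")))
      if kept = [] then rows
      else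
        let cols := kept.map (fun i => rows.map (fun r => if i < r.length then r.getD i "" else ""))
        let outCols := bGo (cols.headD []) cols.tail
        (List.range rows.length).map (fun j => outCols.map (fun c => c.getD j ""))

-- ===== PRECONDITION & SPEC =====
def Spec_collapse_empty_columns_py (rows : List (List String)) (out : List (List String)) : Prop := out = collapse_empty_columns_py_alt rows
instance (rows : List (List String)) (out : List (List String)) : Decidable (Spec_collapse_empty_columns_py rows out) := by unfold Spec_collapse_empty_columns_py; infer_instance

-- ===== CLAIM (what is proved, stated in full; the proofs are below) =====
def Claim_equal_collapse_empty_columns_py : Prop := ∀ (rows : List (List String)), Dom_collapse_empty_columns_py rows → Spec_collapse_empty_columns_py rows (collapse_empty_columns_py rows)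

-- ===== LEMMAS AND PROOFS =====

-- proof-side abbreviations
def pvNe (s : String) : Bool := !(PySem.Str.strip s == "")
def mcell (a b : String) : String :=
  PySem.Str.strip (PySem.Str.strip a ++ " " ++ PySem.Str.strip b)
def colsW (w : Nat) (fr : List (List String)) : List (List String) :=
  (List.range w).map (fun i => fr.map (fun r => r.getD i ""))
def rowsOf (m : Nat) (cs : List (List String)) : List (List String) :=
  (List.range m).map (fun j => cs.map (fun c => c.getD j ""))
def bGoF : List (List String) → List (List String)
  | [] => []
  | c :: cs => bGo c cs
def mAtC : List (List String) → Nat → List (List String)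
  | c1 :: c2 :: t, 0 => bMerge c1 c2 :: t
  | c1 :: t, n + 1 => c1 :: mAtC t n
  | l, _ => l

-- ---- string plumbing and column-level lemmas ----
theorem dropWhile_all {α : Type} (p : α → Bool) (l : List α) :
    (List.dropWhile p l).all p = l.all p := by
  induction l with
  | nil => rfl
  | cons a t ih =>
      by_cases h : p a
      · simp [h, ih]
      · simp [h]

theorem strip_all (l : List Char) :
    (PySem.Chars.strip l).all PySem.Chars.isspace = l.all PySem.Chars.isspace := by
  simp [PySem.Chars.strip, PySem.Chars.rstrip, PySem.Chars.lstrip, List.all_reverse,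
    dropWhile_all]

theorem strip_eq_nil_iff (l : List Char) :
    PySem.Chars.strip l = [] ↔ l.all PySem.Chars.isspace = true := by
  simp [PySem.Chars.strip, PySem.Chars.rstrip, PySem.Chars.lstrip,
    List.dropWhile_eq_nil_iff, ← List.all_eq_true]
  simp [dropWhile_all]

theorem pvNe_mcell_left (a b : String) (h : pvNe a = true) : pvNe (mcell a b) = true := by
  simp only [pvNe, mcell, Bool.not_eq_true', beq_eq_false_iff_ne, ne_eq] at *
  intro hc
  apply h
  have h1 : (PySem.Str.strip (PySem.Str.strip (PySem.Str.strip a ++ " " ++ PySem.Str.strip b))).toList = [] := by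
    rw [hc]; rfl
  rw [PySem.Str.toList_strip, strip_eq_nil_iff, PySem.Str.toList_strip, strip_all,
    String.toList_append, String.toList_append] at h1
  simp only [List.all_append, Bool.and_eq_true] at h1
  have h2 := h1.1.1
  rw [PySem.Str.toList_strip, strip_all, ← strip_eq_nil_iff] at h2
  have h3 : (PySem.Str.strip a).toList = [] := by rw [PySem.Str.toList_strip]; exact h2
  exact String.toList_eq_nil_iff.mp h3

theorem mAtC_zero (c1 c2 : List String) (t : List (List String)) :
    mAtC (c1 :: c2 :: t) 0 = bMerge c1 c2 :: t := rfl

theorem mAtC_cons_succ (c : List String) (t : List (List String)) (n : Nat) :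
    mAtC (c :: t) (n + 1) = c :: mAtC t n := by cases t <;> rfl

theorem bCompl_eq_false_iff (x y : List String) :
    bCompl x y = false ↔ ∃ i, ∃ (h1 : i < x.length) (h2 : i < y.length),
      pvNe x[i] = true ∧ pvNe y[i] = true := by
  simp only [bCompl, List.all_eq_false]
  constructor
  · rintro ⟨p, hp, hnp⟩
    obtain ⟨i, hi, hpi⟩ := List.mem_iff_getElem.mp hp
    rw [List.getElem_zip] at hpi
    subst hpi
    simp at hnp
    refine ⟨i, by simp at hi; omega, by simp at hi; omega, ?_, ?_⟩
    · simp only [pvNe, Bool.not_eq_true', beq_eq_false_iff_ne, ne_eq]; exact hnp.1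
    · simp only [pvNe, Bool.not_eq_true', beq_eq_false_iff_ne, ne_eq]; exact hnp.2
  · rintro ⟨i, h1, h2, hx, hy⟩
    refine ⟨(x[i], y[i]), ?_, ?_⟩
    · have hlt : i < (x.zip y).length := by simp; omega
      have hmem := List.getElem_mem hlt
      rwa [List.getElem_zip] at hmem
    · simp only [pvNe, Bool.not_eq_true', beq_eq_false_iff_ne, ne_eq] at hx hy
      simp [hx, hy]

theorem getElem_bMerge (x y : List String) (i : Nat) (h : i < (bMerge x y).length) :
    (bMerge x y)[i] = mcell (x[i]'(by simp [bMerge] at h; omega) ) (y[i]'(by simp [bMerge] at h; omega)) := by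
  simp [bMerge, List.getElem_map, List.getElem_zip, mcell]

theorem bCompl_merge_left (x y z : List String)
    (hxy : x.length = y.length) (hyz : y.length = z.length)
    (h : bCompl x y = false) : bCompl x (bMerge y z) = false := by
  rw [bCompl_eq_false_iff] at h ⊢
  obtain ⟨i, h1, h2, hx, hy⟩ := h
  refine ⟨i, h1, by simp [bMerge]; omega, hx, ?_⟩
  rw [getElem_bMerge]
  exact pvNe_mcell_left _ _ hy

theorem bGoF_fix : ∀ cs : List (List String),
    (∀ j, j + 1 < cs.length → bCompl (cs.getD j []) (cs.getD (j + 1) []) = false) →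
    bGoF cs = cs := by
  intro cs
  induction cs with
  | nil => intro _; rfl
  | cons c cs ih =>
      intro h
      cases cs with
      | nil => rfl
      | cons c2 t =>
          have h0 : bCompl c c2 = false := by
            have := h 0 (by simp)
            simpa using this
          show bGo c (c2 :: t) = c :: c2 :: t
          rw [bGo, if_neg (by simp [h0])]
          have : bGoF (c2 :: t) = c2 :: t := by
            apply ih
            intro j hj
            have := h (j + 1) (by simp at hj ⊢; omega)
            simpa using this
          rw [show bGo c2 t = bGoF (c2 :: t) from rfl, this]

theorem bGo_cons_not (acc c : List String) (cs : List (List String))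
    (h : bCompl acc c = false) : bGo acc (c :: cs) = acc :: bGo c cs := by
  rw [bGo, if_neg (by simp [h])]

theorem bGoF_mergeFirst (m : Nat) : ∀ (ci : Nat) (cs : List (List String)),
    (∀ c ∈ cs, c.length = m) → ci + 1 < cs.length →
    bCompl (cs.getD ci []) (cs.getD (ci + 1) []) = true →
    (∀ j, j < ci → bCompl (cs.getD j []) (cs.getD (j + 1) []) = false) →
    bGoF (mAtC cs ci) = bGoF cs := by
  intro ci
  induction ci with
  | zero =>
      intro cs hlen hlt hc _
      match cs, hlt with
      | c1 :: c2 :: t, _ =>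
          rw [mAtC_zero]
          have hc' : bCompl c1 c2 = true := by simpa using hc
          show bGo (bMerge c1 c2) t = bGo c1 (c2 :: t)
          rw [bGo, if_pos hc']
  | succ i ih =>
      intro cs hlen hlt hc hprev
      match cs, hlt with
      | c1 :: cs', hlt =>
          have h0 : bCompl c1 (cs'.getD 0 []) = false := by
            have := hprev 0 (by omega)
            simpa using this
          have hlen' : ∀ c ∈ cs', c.length = m := fun c hc => hlen c (List.mem_cons_of_mem _ hc)
          have hlt' : i + 1 < cs'.length := by simpa using hlt
          have hc' : bCompl (cs'.getD i []) (cs'.getD (i + 1) []) = true := by simpa using hc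
          have hprev' : ∀ j, j < i → bCompl (cs'.getD j []) (cs'.getD (j + 1) []) = false := by
            intro j hj
            have := hprev (j + 1) (by omega)
            simpa using this
          rw [mAtC_cons_succ]
          show bGoF (c1 :: mAtC cs' i) = bGoF (c1 :: cs')
          cases cs' with
          | nil => simp at hlt'
          | cons a t' =>
              have hIH := ih (a :: t') hlen' hlt' hc' hprev'
              have h0' : bCompl c1 a = false := by simpa using h0
              obtain ⟨d, t, hM, hbc⟩ :
                  ∃ d t, mAtC (a :: t') i = d :: t ∧ bCompl c1 d = false := by
                cases i with
                | zero =>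
                    cases t' with
                    | nil => simp at hlt'
                    | cons b t'' =>
                        refine ⟨bMerge a b, t'', mAtC_zero a b t'', ?_⟩
                        apply bCompl_merge_left
                        · have e1 := hlen c1 (by simp)
                          have e2 := hlen' a (by simp)
                          omega
                        · have e2 := hlen' a (by simp)
                          have e3 := hlen' b (by simp)
                          omega
                        · exact h0'
                | succ k =>
                    exact ⟨a, mAtC t' k, mAtC_cons_succ a t' k, h0'⟩
              show bGo c1 (mAtC (a :: t') i) = bGo c1 (a :: t')
              rw [hM]
              rw [bGo_cons_not _ _ _ hbc, bGo_cons_not _ _ _ h0']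
              have hgg : bGo d t = bGo a t' := by
                rw [hM] at hIH
                simpa using hIH
              rw [hgg]

theorem colsW_getD (w : Nat) (fr : List (List String)) (i : Nat) (hi : i < w) :
    (colsW w fr).getD i [] = fr.map (fun r => r.getD i "") := by
  rw [colsW, List.getD_eq_getElem _ _ (by simpa using hi)]
  simp

theorem getD_range_map_self {α : Type} (l : List α) (d : α) :
    (List.range l.length).map (fun i => l.getD i d) = l := by
  apply List.ext_getElem
  · simp
  · intro i h1 h2
    simp only [List.getElem_map, List.getElem_range]
    exact List.getD_eq_getElem _ _ h2

theorem rowsOf_colsW (w m : Nat) (fr : List (List String))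
    (hrect : ∀ r ∈ fr, r.length = w) (hm : fr.length = m) :
    rowsOf m (colsW w fr) = fr := by
  apply List.ext_getElem
  · simp [rowsOf, hm]
  · intro j h1 h2
    simp only [rowsOf, List.getElem_map, List.getElem_range, colsW, List.map_map]
    have hj : j < fr.length := h2
    have hlen : fr[j].length = w := hrect _ (List.getElem_mem hj)
    calc (List.range w).map ((fun c => c.getD j "") ∘ fun i => fr.map fun r => r.getD i "")
        = (List.range w).map (fun i => fr[j].getD i "") := by
          apply List.map_congr_left
          intro i _
          simp only [Function.comp]
          rw [List.getD_eq_getElem _ _ (by simpa using hj)]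
          simp
      _ = fr[j] := by rw [← hlen]; exact getD_range_map_self _ _

theorem all_congr_mem {α : Type} {l : List α} {p q : α → Bool}
    (h : ∀ a ∈ l, p a = q a) : l.all p = l.all q := by
  induction l with
  | nil => rfl
  | cons a t ih =>
      simp only [List.all_cons, h a (by simp), ih (fun b hb => h b (by simp [hb]))]

theorem aOverlap_eq (fr : List (List String)) (w ci : Nat)
    (hrect : ∀ r ∈ fr, r.length = w) (hci : ci + 1 < w) :
    aOverlap fr ci = !(bCompl (fr.map (fun r => r.getD ci "")) (fr.map (fun r => r.getD (ci + 1) ""))) := by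
  rw [aOverlap, bCompl, List.zip_map', List.all_map, List.any_eq_not_all_not]
  congr 1
  apply all_congr_mem
  intro r hr
  have h1 : ci < r.length := by have := hrect r hr; omega
  have h2 : ci + 1 < r.length := by have := hrect r hr; omega
  simp [aCell, h1, h2]

theorem aMerge_rect (fr : List (List String)) (w ci : Nat)
    (hrect : ∀ r ∈ fr, r.length = w) (hci : ci + 1 < w) :
    ∀ r ∈ aMerge fr ci, r.length = w - 1 := by
  intro r hr
  simp only [aMerge, List.map_map, List.mem_map, Function.comp] at hr
  obtain ⟨row, hrow, rfl⟩ := hr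
  have hw := hrect row hrow
  rw [if_pos (by simp [List.length_set]; omega)]
  simp [List.length_eraseIdx, List.length_set, hw, hci]

theorem length_aMerge (fr : List (List String)) (ci : Nat) :
    (aMerge fr ci).length = fr.length := by simp [aMerge]

theorem length_colsW (w : Nat) (fr : List (List String)) : (colsW w fr).length = w := by
  simp [colsW]

theorem mAtC_length : ∀ (ci : Nat) (cs : List (List String)), ci + 1 < cs.length →
    (mAtC cs ci).length = cs.length - 1 := by
  intro ci
  induction ci with
  | zero =>
      intro cs h
      match cs, h with
      | c1 :: c2 :: t, _ => simp [mAtC_zero]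
  | succ n ih =>
      intro cs h
      match cs, h with
      | c :: t, h =>
          rw [mAtC_cons_succ]
          have ht : n + 1 < t.length := by simpa using h
          simp [ih t ht]
          omega

theorem getD_mAtC : ∀ (ci : Nat) (cs : List (List String)), ci + 1 < cs.length →
    ∀ i, (mAtC cs ci).getD i [] =
      if i < ci then cs.getD i []
      else if i = ci then bMerge (cs.getD ci []) (cs.getD (ci + 1) [])
      else cs.getD (i + 1) [] := by
  intro ci
  induction ci with
  | zero =>
      intro cs h i
      match cs, h with
      | c1 :: c2 :: t, _ =>
          rw [mAtC_zero]
          cases i with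
          | zero => simp
          | succ k => simp
  | succ n ih =>
      intro cs h i
      match cs, h with
      | c :: t, h =>
          rw [mAtC_cons_succ]
          have ht : n + 1 < t.length := by simpa using h
          cases i with
          | zero => simp
          | succ k =>
              simp only [List.getD_cons_succ]
              rw [ih t ht k]
              by_cases h1 : k < n
              · rw [if_pos h1, if_pos (show k + 1 < n + 1 by omega)]
              · rw [if_neg h1, if_neg (show ¬ k + 1 < n + 1 by omega)]
                by_cases h2 : k = n
                · rw [if_pos h2, if_pos (show k + 1 = n + 1 by omega)]
                · rw [if_neg h2, if_neg (show ¬ k + 1 = n + 1 by omega)]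

theorem colsW_aMerge (fr : List (List String)) (w ci : Nat)
    (hrect : ∀ r ∈ fr, r.length = w) (hci : ci + 1 < w) :
    colsW (w - 1) (aMerge fr ci) = mAtC (colsW w fr) ci := by
  have hlen : (mAtC (colsW w fr) ci).length = w - 1 := by
    rw [mAtC_length ci _ (by simp [length_colsW]; omega), length_colsW]
  apply List.ext_getElem
  · simp [length_colsW, hlen]
  · intro i h1 h2
    have hiw : i < w - 1 := by simpa [length_colsW] using h1
    rw [← List.getD_eq_getElem _ [] h1, ← List.getD_eq_getElem _ [] h2]
    rw [getD_mAtC ci _ (by simp [length_colsW]; omega) i]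
    rw [colsW_getD _ _ _ hiw]
    have haM : aMerge fr ci = fr.map (fun row =>
        if ci + 1 < (row.set ci (PySem.Str.strip (aCell row ci ++ " " ++ aCell row (ci + 1)))).length
        then (row.set ci (PySem.Str.strip (aCell row ci ++ " " ++ aCell row (ci + 1)))).eraseIdx (ci + 1)
        else row.set ci (PySem.Str.strip (aCell row ci ++ " " ++ aCell row (ci + 1)))) := by
      rw [aMerge, List.map_map]; rfl
    rw [haM, List.map_map]
    by_cases hlt : i < ci
    · rw [if_pos hlt, colsW_getD _ _ _ (by omega)]
      apply List.map_congr_left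
      intro row hrow
      have hw := hrect row hrow
      simp only [Function.comp]
      rw [if_pos (by rw [List.length_set]; omega)]
      have hL : ((row.set ci (PySem.Str.strip (aCell row ci ++ " " ++ aCell row (ci + 1)))).eraseIdx (ci + 1)).length = w - 1 := by
        simp [List.length_eraseIdx, List.length_set, hw, hci]
      rw [List.getD_eq_getElem _ _ (by omega), List.getD_eq_getElem _ _ (by omega)]
      rw [List.getElem_eraseIdx]
      rw [dif_pos (by omega), List.getElem_set, if_neg (by omega)]
    · by_cases heq : i = ci
      · rw [if_neg hlt, if_pos heq, colsW_getD _ _ _ (by omega), colsW_getD _ _ _ (by omega)]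
        rw [bMerge, List.zip_map', List.map_map]
        apply List.map_congr_left
        intro row hrow
        have hw := hrect row hrow
        simp only [Function.comp]
        rw [if_pos (by rw [List.length_set]; omega)]
        rw [List.getD_eq_getElem _ _ (by simp [List.length_eraseIdx, List.length_set, hw, hci]; omega)]
        rw [List.getElem_eraseIdx]
        rw [dif_pos (by omega), List.getElem_set, if_pos (by omega)]
        subst heq
        have h1' : i < row.length := by omega
        have h2' : i + 1 < row.length := by omega
        simp [aCell, h1', h2']
      · rw [if_neg hlt, if_neg heq, colsW_getD _ _ _ (by omega)]
        apply List.map_congr_left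
        intro row hrow
        have hw := hrect row hrow
        simp only [Function.comp]
        rw [if_pos (by rw [List.length_set]; omega)]
        rw [List.getD_eq_getElem _ _ (by simp [List.length_eraseIdx, List.length_set, hw, hci]; omega),
          List.getD_eq_getElem _ _ (by omega)]
        rw [List.getElem_eraseIdx]
        rw [dif_neg (by omega), List.getElem_set, if_neg (by omega)]

-- ---- aFirst characterisation ----
theorem aFirst_none (fr : List (List String)) (n : Nat) :
    aFirst fr n = none → ∀ j, j + 1 < n → aOverlap fr j = true := by
  intro h j hj
  rw [aFirst, List.find?_eq_none] at h
  have := h j (by simp; omega)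
  simpa using this

theorem aFirst_some (fr : List (List String)) (n ci : Nat) :
    aFirst fr n = some ci →
      ci + 1 < n ∧ aOverlap fr ci = false ∧ ∀ i, i < ci → aOverlap fr i = true := by
  intro h
  rw [aFirst, List.find?_eq_some_iff_getElem] at h
  obtain ⟨hp, i, hi, hie, hprev⟩ := h
  simp only [List.getElem_range] at hie
  subst hie
  simp only [List.length_range] at hi
  refine ⟨by omega, by simpa using hp, ?_⟩
  intro j hj
  have := hprev j hj
  simpa using this

-- ---- main loop correspondence ----
theorem main_loop : ∀ (w : Nat) (fr : List (List String)) (m : Nat), 0 < m →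
    fr.length = m → (∀ r ∈ fr, r.length = w) →
    aLoopN w fr = rowsOf m (bGoF (colsW w fr)) := by
  intro w
  induction w using Nat.strong_induction_on with
  | _ w ih =>
      intro fr m hm hfm hrect
      have hfr : fr ≠ [] := by intro h; subst h; simp at hfm; omega
      obtain ⟨r0, rest, rfl⟩ := List.exists_cons_of_ne_nil hfr
      have hhead : ((r0 :: rest).headD []).length = w := by
        simp [hrect r0 (by simp)]
      have hcw : (colsW w (r0 :: rest)).length = w := length_colsW w _
      by_cases hw : w ≤ 1
      · have hfix : bGoF (colsW w (r0 :: rest)) = colsW w (r0 :: rest) := by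
          apply bGoF_fix
          intro j hj
          rw [length_colsW] at hj
          omega
        rw [hfix, rowsOf_colsW w m _ hrect hfm]
        cases w with
        | zero => rfl
        | succ k =>
            cases k with
            | zero => rw [aLoopN, if_pos (by rw [hhead])]
            | succ k' => omega
      · obtain ⟨k, rfl⟩ : ∃ k, w = k + 1 := ⟨w - 1, by omega⟩
        rw [aLoopN, if_neg (by rw [hhead]; exact hw)]
        rcases hA : aFirst (r0 :: rest) (((r0 :: rest).headD []).length) with _ | ci
        · simp only [hA]
          rw [hhead] at hA
          have hall := aFirst_none (r0 :: rest) (k + 1) hA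
          have hfix : bGoF (colsW (k + 1) (r0 :: rest)) = colsW (k + 1) (r0 :: rest) := by
            apply bGoF_fix
            intro j hj
            rw [length_colsW] at hj
            have hov := hall j (by omega)
            have := aOverlap_eq (r0 :: rest) (k + 1) j hrect (by omega)
            rw [this] at hov
            rw [colsW_getD _ _ _ (by omega), colsW_getD _ _ _ (by omega)]
            cases hb : bCompl ((r0 :: rest).map (fun r => r.getD j ""))
                ((r0 :: rest).map (fun r => r.getD (j + 1) "")) with
            | false => rfl
            | true => rw [hb] at hov; simp at hov
          rw [hfix, rowsOf_colsW (k + 1) m _ hrect hfm]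
        · simp only [hA]
          rw [hhead] at hA
          obtain ⟨hlt, hov, hprev⟩ := aFirst_some (r0 :: rest) (k + 1) ci hA
          have hrect' := aMerge_rect (r0 :: rest) (k + 1) ci hrect hlt
          have hlen' : (aMerge (r0 :: rest) ci).length = m := by
            rw [length_aMerge]; exact hfm
          have hIH := ih k (by omega) (aMerge (r0 :: rest) ci) m hm hlen'
            (by simpa using hrect')
          rw [hIH]
          have hcA : colsW k (aMerge (r0 :: rest) ci) = mAtC (colsW (k + 1) (r0 :: rest)) ci := by
            have := colsW_aMerge (r0 :: rest) (k + 1) ci hrect hlt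
            simpa using this
          rw [hcA]
          congr 1
          apply bGoF_mergeFirst m ci
          · intro c hc
            rw [colsW] at hc
            simp only [List.mem_map, List.mem_range] at hc
            obtain ⟨i, hi, rfl⟩ := hc
            simp only [List.length_map]
            simpa using hfm
          · rw [length_colsW]; exact hlt
          · rw [colsW_getD _ _ _ (by omega), colsW_getD _ _ _ (by omega)]
            have := aOverlap_eq (r0 :: rest) (k + 1) ci hrect hlt
            rw [hov] at this
            cases hb : bCompl ((r0 :: rest).map (fun r => r.getD ci ""))
                ((r0 :: rest).map (fun r => r.getD (ci + 1) "")) with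
            | true => rfl
            | false => rw [hb] at this; simp at this
          · intro j hj
            rw [colsW_getD _ _ _ (by omega), colsW_getD _ _ _ (by omega)]
            have hovj := hprev j hj
            have := aOverlap_eq (r0 :: rest) (k + 1) j hrect (by omega)
            rw [this] at hovj
            cases hb : bCompl ((r0 :: rest).map (fun r => r.getD j ""))
                ((r0 :: rest).map (fun r => r.getD (j + 1) "")) with
            | false => rfl
            | true => rw [hb] at hovj; simp at hovj

-- ---- glue ----
theorem zipIdx_filter_aux (f : Nat → Bool) :
    ∀ (l : List Nat) (k : Nat), (∀ i (_ : i < l.length), l.getD i 0 = k + i) →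
      (((l.map f).zipIdx k).filter (fun p => p.1)).map (fun p => p.2) = l.filter f := by
  intro l
  induction l with
  | nil => intro k _; rfl
  | cons a t ih =>
      intro k h
      have ha : a = k := by have := h 0 (by simp); simpa using this
      have ht : ∀ i (_ : i < t.length), t.getD i 0 = (k + 1) + i := by
        intro i hi
        have := h (i + 1) (by simp; omega)
        simp only [List.getD_cons_succ] at this
        rw [this]; omega
      subst ha
      by_cases hfa : f a = true
      · simp [List.zipIdx_cons, hfa, ih (a + 1) ht]
      · simp [List.zipIdx_cons, hfa, ih (a + 1) ht]

theorem kept_eq (n : Nat) (f : Nat → Bool) :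
    ((((List.range n).map f).zipIdx.filter (fun p => p.1)).map (fun p => p.2)) =
      (List.range n).filter f := by
  apply zipIdx_filter_aux
  intro i hi
  simp only [List.length_range] at hi
  rw [List.getD_eq_getElem _ _ (by simpa using hi)]
  simp

theorem bGoF_eq_headD (cs : List (List String)) (h : cs ≠ []) :
    bGoF cs = bGo (cs.headD []) cs.tail := by
  cases cs with
  | nil => exact absurd rfl h
  | cons c t => rfl

theorem cols_eq (rows : List (List String)) (K : List Nat) :
    colsW K.length (rows.map (fun row => K.map (fun i => if i < row.length then row.getD i "" else ""))) =
      K.map (fun i => rows.map (fun r => if i < r.length then r.getD i "" else "")) := by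
  apply List.ext_getElem
  · simp [length_colsW]
  · intro i h1 h2
    rw [length_colsW] at h1
    simp only [colsW, List.getElem_map, List.getElem_range, List.map_map]
    apply List.map_congr_left
    intro row _
    simp only [Function.comp]
    rw [List.getD_eq_getElem _ _ (by simpa using h1)]
    simp

-- ===== VERDICT (by name: the statement is the Claim_ definition above) =====
theorem collapse_empty_columns_py_spec : Claim_equal_collapse_empty_columns_py := by
  unfold Claim_equal_collapse_empty_columns_py
  intro rows _
  unfold Spec_collapse_empty_columns_py
  unfold collapse_empty_columns_py collapse_empty_columns_py_alt
  by_cases h0 : rows = []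
  · simp [h0]
  · simp only [if_neg h0]
    by_cases h1 : (PySem.List.max? (rows.map (fun r => r.length)) id).getD 0 ≤ 1
    · simp only [if_pos h1]
    · simp only [if_neg h1]
      rw [kept_eq]
      set f : Nat → Bool := fun ci =>
        rows.any (fun row => decide (ci < row.length) && !(PySem.Str.strip (row.getD ci "") == "")) with hf
      set K : List Nat := (List.range ((PySem.List.max? (rows.map (fun r => r.length)) id).getD 0)).filter f with hK
      by_cases hKe : K = []
      · simp only [if_pos hKe]
      · simp only [if_neg hKe]
        have hm : 0 < rows.length := by
          cases rows with
          | nil => exact absurd rfl h0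
          | cons a t => simp
        have hML := main_loop K.length
          (rows.map (fun row => K.map (fun i => if i < row.length then row.getD i "" else "")))
          rows.length hm (by simp) (by
            intro r hr
            simp only [List.mem_map] at hr
            obtain ⟨row, _, rfl⟩ := hr
            simp)
        have hh : (((rows.map (fun row => K.map (fun i => if i < row.length then row.getD i "" else ""))).headD []).length) = K.length := by
          cases rows with
          | nil => exact absurd rfl h0
          | cons a t => simp
        rw [aLoop, hh, hML, cols_eq]
        rw [bGoF_eq_headD _ (by simp [hKe])]
        rfl
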